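-- pv_equiv track=rewrite | github.com/revjkee/aethernova | core-systems/datafabric-core/datafabric/storage/objectstore/s3_client.py | _split_in_parts
-- ===== SOURCE A (Python) =====
-- from typing import Any, AsyncGenerator, Dict, Iterable, List, Literal, Mapping, Optional, Sequence, Tuple
--
-- def _split_in_parts(total_size: int, part_size: int) -> List[Tuple[int, int]]:
--     # Возвращает список (offset, size)
--     parts: List[Tuple[int, int]] = []
--     off = 0
--     while off < total_size:
--         size = min(part_size, total_size - off)
--         parts.append((off, size))
--         off += size
--     return parts
-- ===== SOURCE B (Python) =====
-- def _split_in_parts(total_size: int, part_size: int):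
--     # Closed-form: compute the part count by ceiling division, then derive each
--     # (offset, size) from its index -- no running-offset accumulator.
--     if total_size <= 0:
--         return []
--     n = -(-total_size // part_size)
--     return [(i * part_size, min(part_size, total_size - i * part_size))
--             for i in range(n)]
-- ===== Notes on version B (the rewrite author's own statement) =====
-- stated objective: simpler
-- what changed: Replaced the while-loop with a running offset accumulator by ceiling-division part count plus a list comprehension that computes each (offset,size) directly from its index.
import Mathlib
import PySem

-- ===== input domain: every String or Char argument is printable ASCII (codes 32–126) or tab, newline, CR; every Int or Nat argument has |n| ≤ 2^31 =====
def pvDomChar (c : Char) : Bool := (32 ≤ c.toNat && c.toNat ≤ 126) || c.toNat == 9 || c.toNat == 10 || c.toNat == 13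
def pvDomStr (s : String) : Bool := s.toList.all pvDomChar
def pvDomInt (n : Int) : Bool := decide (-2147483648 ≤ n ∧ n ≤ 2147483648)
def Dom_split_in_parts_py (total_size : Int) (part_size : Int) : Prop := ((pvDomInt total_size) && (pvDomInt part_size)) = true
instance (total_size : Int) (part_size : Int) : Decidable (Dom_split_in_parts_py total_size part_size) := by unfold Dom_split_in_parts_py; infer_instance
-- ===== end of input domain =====

-- B replaces A's running-offset while-loop by a ceiling-division part count and an
-- index-based comprehension (same value wherever A terminates; objective: simpler).

-- ===== PORT A =====
-- A's while loop; the extra '0 < min …' conjunct is a pure totality guard (it makes the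
-- recursion well-founded; under Pre_ it is implied by 'off < total_size', so the loop body
-- is exactly Python A's on every admitted input)
def splitLoopA (total_size part_size off : Int) (parts : List (Int × Int)) :
    List (Int × Int) :=
  if _h : off < total_size ∧ 0 < min part_size (total_size - off) then
    splitLoopA total_size part_size (off + min part_size (total_size - off))
      (parts ++ [(off, min part_size (total_size - off))])
  else parts
termination_by (total_size - off).toNat
decreasing_by omega

def split_in_parts_py (total_size : Int) (part_size : Int) : List (Int × Int) :=
  splitLoopA total_size part_size 0 []

-- ===== PORT B =====
def split_in_parts_py_alt (total_size : Int) (part_size : Int) : List (Int × Int) :=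
  if total_size ≤ 0 then []
  else
    let n := -(PySem.Int.floordiv (-total_size) part_size)
    (PySem.List.pyRange 0 n 1).map
      (fun i => (i * part_size, min part_size (total_size - i * part_size)))

-- ===== PRECONDITION & SPEC =====
-- Pre_ excludes total_size > 0 with part_size ≤ 0: there Python A loops forever (never returns a value).
def Pre_split_in_parts_py (total_size : Int) (part_size : Int) : Prop :=
  total_size ≤ 0 ∨ 0 < part_size
instance (total_size : Int) (part_size : Int) : Decidable (Pre_split_in_parts_py total_size part_size) := by
  unfold Pre_split_in_parts_py; infer_instance

def pvWitness_split_in_parts_py : Int × Int := (10, 3)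

def Spec_split_in_parts_py (total_size : Int) (part_size : Int) (out : List (Int × Int)) : Prop :=
  out = split_in_parts_py_alt total_size part_size
instance (total_size : Int) (part_size : Int) (out : List (Int × Int)) : Decidable (Spec_split_in_parts_py total_size part_size out) := by
  unfold Spec_split_in_parts_py; infer_instance

-- ===== CLAIM (what is proved, stated in full; the proofs are below) =====
def Claim_equal_split_in_parts_py : Prop :=
  ∀ (total_size : Int) (part_size : Int), Dom_split_in_parts_py total_size part_size →
    Pre_split_in_parts_py total_size part_size →
    Spec_split_in_parts_py total_size part_size (split_in_parts_py total_size part_size)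

-- ===== LEMMAS AND PROOFS =====

-- ceiling division -((-r) // p), as computed by B
def pvCeil (r p : Int) : Int := -(PySem.Int.floordiv (-r) p)

theorem pvCeil_bounds (r p : Int) (hp : 0 < p) :
    (pvCeil r p - 1) * p < r ∧ r ≤ pvCeil r p * p :=
  (PySem.Int.neg_floordiv_neg_eq_iff_of_pos hp).mp rfl

theorem pvCeil_nonpos (r p : Int) (hp : 0 < p) (hr : r ≤ 0) : pvCeil r p ≤ 0 := by
  rcases pvCeil_bounds r p hp with ⟨h1, h2⟩
  nlinarith

theorem pvCeil_nonneg (r p : Int) (hp : 0 < p) (hr : 0 ≤ r) : 0 ≤ pvCeil r p := by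
  rcases pvCeil_bounds r p hp with ⟨h1, h2⟩
  nlinarith

theorem pvCeil_zero (p : Int) (hp : 0 < p) : pvCeil 0 p = 0 := by
  have h := pvCeil_bounds 0 p hp
  nlinarith [h.1, h.2]

theorem pvCeil_step (r p : Int) (hp : 0 < p) (hr : 0 < r) :
    pvCeil r p = pvCeil (r - min p r) p + 1 := by
  rcases pvCeil_bounds (r - min p r) p hp with ⟨h1, h2⟩
  rw [pvCeil, PySem.Int.neg_floordiv_neg_eq_iff_of_pos hp]
  by_cases h : p ≤ r
  · simp only [min_eq_left h] at h1 h2 ⊢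
    constructor <;> nlinarith
  · simp only [min_eq_right (by omega : r ≤ p), sub_self, pvCeil_zero p hp] at h1 h2 ⊢
    constructor <;> nlinarith

theorem splitLoopA_eq (p : Int) (hp : 0 < p) :
    ∀ (n : Nat) (t off : Int) (acc : List (Int × Int)), (t - off).toNat ≤ n →
      splitLoopA t p off acc =
        acc ++ (PySem.List.pyRange 0 (pvCeil (t - off) p) 1).map
          (fun i => (off + i * p, min p (t - off - i * p))) := by
  intro n
  induction n with
  | zero =>
    intro t off acc hn
    rw [splitLoopA, dif_neg (by omega),
      PySem.List.pyRange_one_eq_nil (pvCeil_nonpos _ _ hp (by omega))]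
    simp
  | succ n ih =>
    intro t off acc hn
    by_cases ht : t ≤ off
    · rw [splitLoopA, dif_neg (by omega),
        PySem.List.pyRange_one_eq_nil (pvCeil_nonpos _ _ hp (by omega))]
      simp
    · have ht' : off < t := by omega
      have hs : 0 < min p (t - off) := by omega
      rw [splitLoopA, dif_pos ⟨ht', hs⟩, ih _ _ _ (by omega)]
      have hsub : t - (off + min p (t - off)) = t - off - min p (t - off) := by ring
      simp only [hsub]
      have hc : pvCeil (t - off) p = pvCeil (t - off - min p (t - off)) p + 1 :=
        pvCeil_step (t - off) p hp (by omega)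
      have hnn : 0 ≤ pvCeil (t - off - min p (t - off)) p :=
        pvCeil_nonneg _ _ hp (by omega)
      conv_rhs => rw [hc, PySem.List.pyRange_one_cons
        (by omega : (0:Int) < pvCeil (t - off - min p (t - off)) p + 1)]
      simp only [List.map_cons, List.append_assoc, List.singleton_append]
      congr 1
      congr 1
      · simp
      · by_cases h : p ≤ t - off
        · simp only [min_eq_left h, zero_add]
          rw [PySem.List.pyRange_one 1, PySem.List.pyRange_one 0]
          simp only [List.map_map]
          rw [show (pvCeil (t - off - p) p + 1 - 1).toNat
              = (pvCeil (t - off - p) p - 0).toNat by omega]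
          apply List.map_congr_left
          intro k _
          simp only [Function.comp_apply]
          refine congrArg₂ Prod.mk (by ring) ?_
          congr 1
          ring
        · have hmin : min p (t - off) = t - off := min_eq_right (by omega)
          simp only [hmin, sub_self, pvCeil_zero p hp]
          rw [PySem.List.pyRange_one_eq_nil (by omega),
            PySem.List.pyRange_one_eq_nil (by omega)]
          simp

-- ===== VERDICT (by name: the statement is the Claim_ definition above) =====
theorem split_in_parts_py_spec : Claim_equal_split_in_parts_py := by
  intro t p _ hpre
  unfold Spec_split_in_parts_py split_in_parts_py split_in_parts_py_alt
  by_cases ht : t ≤ 0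
  · rw [if_pos ht, splitLoopA, dif_neg (by omega)]
  · have hp : 0 < p := by rcases hpre with h | h <;> omega
    rw [if_neg ht, splitLoopA_eq p hp t.toNat t 0 [] (by omega)]
    simp only [List.nil_append, sub_zero, zero_add]
    rfl
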